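-- pv_equiv track=rewrite | github.com/OurPlanscape/Planscape | src/planscape/forsys/cluster_stands.py | _get_cluster_pixels
-- ===== SOURCE A (Python) =====
-- def _get_cluster_pixels(cluster_labels: list[int],
--                         mask: list[list[bool]],
--                         pixel_width: int, pixel_height: int
--                         ) -> dict[int, list[tuple[int, int]]]:
--     i = 0
--     cluster_to_pixels = {}
--     for x in range(pixel_width):
--         for y in range(pixel_height):
--             if mask[x][y]:
--                 cluster = cluster_labels[i]
--                 if cluster in cluster_to_pixels.keys():
--                     cluster_to_pixels[cluster].append((x, y))
--                 else:
--                     cluster_to_pixels[cluster] = [(x, y)]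
--                 i = i + 1
--     return cluster_to_pixels
-- ===== SOURCE B (Python) =====
-- def _get_cluster_pixels(cluster_labels: list[int],
--                         mask: list[list[bool]],
--                         pixel_width: int, pixel_height: int
--                         ) -> dict[int, list[tuple[int, int]]]:
--     coords = [(x, y)
--               for x in range(pixel_width)
--               for y in range(pixel_height)
--               if mask[x][y]]
--     labels = [cluster_labels[i] for i in range(len(coords))]
--     order = list(dict.fromkeys(labels))
--     return {c: [p for l, p in zip(labels, coords) if l == c] for c in order}
-- ===== Notes on version B (the rewrite author's own statement) =====
-- stated objective: alternative
-- what changed: Replaces A's single-pass scan that interleaves a pixel counter with in-place dict mutation (append-or-create per pixel) by a per-key grouping: compute the distinct labels in first-occurrence order, then build each cluster's coordinate list wholesale with its own filtering pass; no mutable dict or append is used.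
import Mathlib
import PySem

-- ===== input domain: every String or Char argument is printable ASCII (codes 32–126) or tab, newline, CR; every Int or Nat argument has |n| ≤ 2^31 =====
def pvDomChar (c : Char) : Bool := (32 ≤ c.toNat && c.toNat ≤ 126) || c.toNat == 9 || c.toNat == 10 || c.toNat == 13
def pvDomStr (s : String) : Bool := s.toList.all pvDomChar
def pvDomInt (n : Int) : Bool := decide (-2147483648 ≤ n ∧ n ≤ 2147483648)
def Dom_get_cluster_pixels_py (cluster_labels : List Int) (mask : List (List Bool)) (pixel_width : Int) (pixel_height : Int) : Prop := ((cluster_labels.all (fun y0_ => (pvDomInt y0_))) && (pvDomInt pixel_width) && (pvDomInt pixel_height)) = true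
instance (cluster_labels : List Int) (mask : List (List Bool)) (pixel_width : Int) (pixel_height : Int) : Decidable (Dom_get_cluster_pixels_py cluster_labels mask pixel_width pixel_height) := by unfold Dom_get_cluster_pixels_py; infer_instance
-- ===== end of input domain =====

-- ===== PORT A =====
-- B ('_alt') replaces A's single-pass dict mutation (append-or-create per pixel) by per-key grouping:
-- distinct labels in first-occurrence order, each cluster's list built wholesale by its own filter pass.
-- shared accessor helper: mask[x][y] read totally (out-of-range treated as False; Pre_ keeps such reads out)
def pvMaskAt (mask : List (List Bool)) (x y : Int) : Bool :=
  (((PySem.List.pyGet? mask x).bind (fun r => PySem.List.pyGet? r y)).getD false)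

def get_cluster_pixels_py (cluster_labels : List Int) (mask : List (List Bool)) (pixel_width : Int) (pixel_height : Int) : List (Int × List (Int × Int)) :=
  -- i = 0; cluster_to_pixels = {}; for x in range(pixel_width): for y in range(pixel_height): ...
  (((PySem.List.pyRange 0 pixel_width 1).foldl
      (fun (st : Int × PySem.Dict Int (List (Int × Int))) x =>
        (PySem.List.pyRange 0 pixel_height 1).foldl
          (fun st y =>
            if pvMaskAt mask x y then
              -- cluster = cluster_labels[i]  (total read; Pre_ guarantees i is in range)
              let c := (PySem.List.pyGet? cluster_labels st.1).getD 0
              let d := if st.2.contains c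
                         then st.2.modify c [] (fun l => l ++ [(x, y)])  -- cluster_to_pixels[cluster].append((x, y))
                         else st.2.insert c [(x, y)]                     -- cluster_to_pixels[cluster] = [(x, y)]
              (st.1 + 1, d)
            else st) st)
      ((0 : Int), PySem.Dict.empty)).2).items

-- ===== PORT B =====
def get_cluster_pixels_py_alt (cluster_labels : List Int) (mask : List (List Bool)) (pixel_width : Int) (pixel_height : Int) : List (Int × List (Int × Int)) :=
  -- coords = [(x, y) for x in range(pixel_width) for y in range(pixel_height) if mask[x][y]]
  let coords := (PySem.List.pyRange 0 pixel_width 1).flatMap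
    (fun x => ((PySem.List.pyRange 0 pixel_height 1).filter (fun y => pvMaskAt mask x y)).map (fun y => (x, y)))
  -- labels = [cluster_labels[i] for i in range(len(coords))]
  let labels := (PySem.List.pyRange 0 (coords.length : Int) 1).map
    (fun i => (PySem.List.pyGet? cluster_labels i).getD 0)
  -- order = list(dict.fromkeys(labels))  (distinct labels in first-occurrence order)
  let order := PySem.Set.ofList labels
  -- {c: [p for l, p in zip(labels, coords) if l == c] for c in order}
  (order.foldl
    (fun (d : PySem.Dict Int (List (Int × Int))) c =>
      d.insert c (((labels.zip coords).filter (fun p => p.1 == c)).map (fun p => p.2)))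
    PySem.Dict.empty).items

-- ===== PRECONDITION & SPEC =====
-- Pre_ excludes exactly the inputs on which A raises IndexError: a scanned row index beyond mask,
-- a scanned column beyond its row, or more masked pixels in the scanned window than cluster labels.
def Pre_get_cluster_pixels_py (cluster_labels : List Int) (mask : List (List Bool)) (pixel_width : Int) (pixel_height : Int) : Prop :=
  (0 < pixel_width ∧ 0 < pixel_height) →
    (pixel_width.toNat ≤ mask.length ∧
     (∀ row ∈ mask.take pixel_width.toNat, pixel_height.toNat ≤ row.length) ∧
     ((mask.take pixel_width.toNat).map (fun r => (r.take pixel_height.toNat).countP (fun b => b))).sum ≤ cluster_labels.length)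
instance (cluster_labels : List Int) (mask : List (List Bool)) (pixel_width : Int) (pixel_height : Int) : Decidable (Pre_get_cluster_pixels_py cluster_labels mask pixel_width pixel_height) := by unfold Pre_get_cluster_pixels_py; infer_instance

def pvWitness_get_cluster_pixels_py : List Int × List (List Bool) × Int × Int :=
  ([0, 1, 0], [[true, false], [true, true]], 2, 2)

def Spec_get_cluster_pixels_py (cluster_labels : List Int) (mask : List (List Bool)) (pixel_width : Int) (pixel_height : Int) (out : List (Int × List (Int × Int))) : Prop := out = get_cluster_pixels_py_alt cluster_labels mask pixel_width pixel_height
instance (cluster_labels : List Int) (mask : List (List Bool)) (pixel_width : Int) (pixel_height : Int) (out : List (Int × List (Int × Int))) : Decidable (Spec_get_cluster_pixels_py cluster_labels mask pixel_width pixel_height out) := by unfold Spec_get_cluster_pixels_py; infer_instance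

-- ===== CLAIM (what is proved, stated in full; the proofs are below) =====
def Claim_equal_get_cluster_pixels_py : Prop := ∀ (cluster_labels : List Int) (mask : List (List Bool)) (pixel_width : Int) (pixel_height : Int), Dom_get_cluster_pixels_py cluster_labels mask pixel_width pixel_height → Pre_get_cluster_pixels_py cluster_labels mask pixel_width pixel_height → Spec_get_cluster_pixels_py cluster_labels mask pixel_width pixel_height (get_cluster_pixels_py cluster_labels mask pixel_width pixel_height)

-- ===== LEMMAS AND PROOFS =====
-- proof-side names for A's loop skeleton
def pvLab (cluster_labels : List Int) (i : Int) : Int := (PySem.List.pyGet? cluster_labels i).getD 0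

def pvStep (d : PySem.Dict Int (List (Int × Int))) (p : Int × (Int × Int)) : PySem.Dict Int (List (Int × Int)) :=
  d.modify p.1 [] (fun l => l ++ [p.2])

def pvFlatStep (cluster_labels : List Int) (st : Int × PySem.Dict Int (List (Int × Int))) (c : Int × Int) : Int × PySem.Dict Int (List (Int × Int)) :=
  (st.1 + 1, pvStep st.2 (pvLab cluster_labels st.1, c))

-- A's "if key present append else insert singleton" is one dict.modify
theorem pvBranch_eq (d : PySem.Dict Int (List (Int × Int))) (c : Int) (p : Int × Int) :
    (if d.contains c then d.modify c [] (fun l => l ++ [p]) else d.insert c [p]) = pvStep d (c, p) := by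
  by_cases h : d.contains c
  · simp [h, pvStep]
  · have h' : d.contains c = false := by simpa using h
    have h2 : d.getD c [] = [] := PySem.Dict.getD_of_not_contains d [] h'
    simp [h, pvStep, PySem.Dict.modify, h2]

-- A's nested loop is the flat loop over the masked coordinates
theorem pvA_flat (cluster_labels : List Int) (mask : List (List Bool)) (W H : Int) :
    (PySem.List.pyRange 0 W 1).foldl
      (fun (st : Int × PySem.Dict Int (List (Int × Int))) x =>
        (PySem.List.pyRange 0 H 1).foldl
          (fun st y =>
            if pvMaskAt mask x y then
              let c := (PySem.List.pyGet? cluster_labels st.1).getD 0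
              let d := if st.2.contains c
                         then st.2.modify c [] (fun l => l ++ [(x, y)])
                         else st.2.insert c [(x, y)]
              (st.1 + 1, d)
            else st) st)
      ((0 : Int), PySem.Dict.empty)
    = ((PySem.List.pyRange 0 W 1).flatMap
        (fun x => ((PySem.List.pyRange 0 H 1).filter (fun y => pvMaskAt mask x y)).map (fun y => (x, y)))).foldl
        (pvFlatStep cluster_labels) ((0 : Int), PySem.Dict.empty) := by
  rw [List.foldl_flatMap]
  apply PySem.List.foldl_congr_mem
  intro st x hx
  have hbody : (fun (st : Int × PySem.Dict Int (List (Int × Int))) y =>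
      if pvMaskAt mask x y then
        let c := (PySem.List.pyGet? cluster_labels st.1).getD 0
        let d := if st.2.contains c
                   then st.2.modify c [] (fun l => l ++ [(x, y)])
                   else st.2.insert c [(x, y)]
        (st.1 + 1, d)
      else st)
      = (fun st y => if pvMaskAt mask x y then pvFlatStep cluster_labels st (x, y) else st) := by
    funext st y
    by_cases hm : pvMaskAt mask x y
    · simp only [hm, if_true]
      exact congrArg (Prod.mk (st.1 + 1)) (pvBranch_eq st.2 _ (x, y))
    · simp [hm]
  rw [hbody, PySem.List.foldl_if_eq_foldl_filter, List.foldl_map]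

-- counting out the index: the flat loop is a fold of pvStep over label/coordinate pairs
theorem pvFlat_pairs (cluster_labels : List Int) (cs : List (Int × Int)) (i0 : Int) (d0 : PySem.Dict Int (List (Int × Int))) :
    cs.foldl (pvFlatStep cluster_labels) (i0, d0)
    = (i0 + cs.length,
       (((PySem.List.pyRange i0 (i0 + cs.length) 1).map (pvLab cluster_labels)).zip cs).foldl
         (fun d (p : Int × (Int × Int)) => pvStep d p) d0) := by
  induction cs generalizing i0 d0 with
  | nil => simp [PySem.List.pyRange]
  | cons c cs ih =>
    have hlt : i0 < i0 + ((c :: cs).length : Int) := by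
      simp only [List.length_cons]; push_cast; omega
    rw [PySem.List.pyRange_one_cons hlt]
    simp only [List.foldl_cons, List.map_cons, List.zip_cons_cons]
    rw [show pvFlatStep cluster_labels (i0, d0) c
          = (i0 + 1, pvStep d0 (pvLab cluster_labels i0, c)) from rfl, ih]
    have harith : i0 + ((c :: cs).length : Int) = (i0 + 1) + (cs.length : Int) := by
      simp only [List.length_cons]; push_cast; omega
    rw [harith]

-- the items of A's grouping fold: distinct keys in first-occurrence order, each with its filtered group
theorem pvGroup_items (ps : List (Int × (Int × Int))) :
    (ps.foldl pvStep PySem.Dict.empty).items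
    = (PySem.Set.ofList (ps.map (fun p => p.1))).map
        (fun c => (c, (ps.filter (fun p => p.1 == c)).map (fun p => p.2))) := by
  have hstep : pvStep = (fun (d : PySem.Dict Int (List (Int × Int))) (p : Int × (Int × Int)) => d.modify p.1 [] (fun l => l ++ [p.2])) := rfl
  have hkeys : (ps.foldl pvStep PySem.Dict.empty).keys = PySem.Set.ofList (ps.map (fun p => p.1)) := by
    rw [hstep, PySem.Dict.keys_foldl_modify_key (key := fun (p : Int × (Int × Int)) => p.1) (d0 := []) (f := fun _ (p : Int × (Int × Int)) => fun l => l ++ [p.2])]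
    simp [PySem.Set.update_nil_left]
  have hnd : (ps.foldl pvStep PySem.Dict.empty).keys.Nodup := by
    rw [hkeys]; exact PySem.Set.nodup_ofList _
  rw [PySem.Dict.items_eq_map_keys _ hnd [], hkeys]
  refine List.map_congr_left (fun c _ => ?_)
  rw [hstep, PySem.Dict.getD_foldl_modify_append]
  simp [PySem.Dict.getD_empty]

-- ===== VERDICT (by name: the statement is the Claim_ definition above) =====
theorem get_cluster_pixels_py_spec : Claim_equal_get_cluster_pixels_py := by
  intro cluster_labels mask pixel_width pixel_height _ _
  show get_cluster_pixels_py cluster_labels mask pixel_width pixel_height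
      = get_cluster_pixels_py_alt cluster_labels mask pixel_width pixel_height
  unfold get_cluster_pixels_py get_cluster_pixels_py_alt
  dsimp only
  set coords := (PySem.List.pyRange 0 pixel_width 1).flatMap
    (fun x => ((PySem.List.pyRange 0 pixel_height 1).filter (fun y => pvMaskAt mask x y)).map (fun y => (x, y))) with hcoords
  -- A's side: nested loop → flat loop → fold of pvStep over label/coordinate pairs
  rw [pvA_flat, ← hcoords, pvFlat_pairs]
  -- B's labels, in pvLab form
  have hlabels : (PySem.List.pyRange 0 (coords.length : Int) 1).map
      (fun i => (PySem.List.pyGet? cluster_labels i).getD 0)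
      = (PySem.List.pyRange ((0 : Int)) ((0 : Int) + (coords.length : Int)) 1).map (pvLab cluster_labels) := by
    rw [zero_add]; rfl
  rw [hlabels]
  set labels := (PySem.List.pyRange ((0 : Int)) ((0 : Int) + (coords.length : Int)) 1).map (pvLab cluster_labels) with hlab
  have hlen : labels.length = coords.length := by
    rw [hlab, List.length_map, zero_add, PySem.List.pyRange_zero_natCast, List.length_map, List.length_range]
  set ps := labels.zip coords with hps
  -- A's side items, characterised
  rw [pvGroup_items]
  -- the keys of the pairs are exactly B's labels list
  have hfst : ps.map (fun p => p.1) = labels := List.map_fst_zip (le_of_eq hlen)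
  rw [hfst]
  -- B's dict comprehension over the distinct labels appends fresh keys in order
  rw [PySem.Dict.items_foldl_insert_fresh
        (k := fun c => c)
        (v := fun c => ((ps.filter (fun p => p.1 == c)).map (fun p => p.2)))
        (l := PySem.Set.ofList labels) (d := PySem.Dict.empty)
        (fun a _ => PySem.Dict.contains_empty a)
        (by simpa using PySem.Set.nodup_ofList labels)]
  simp [PySem.Dict.empty]
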